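-- pv_equiv track=rewrite | github.com/hzhucn/macarico | macarico/policies/bootstrap.py | min_set
-- ===== SOURCE A (Python) =====
-- def min_set(costs, limit_actions=None):
--     min_val = None
--     min_set = []
--     if limit_actions is None:
--         for a, c in enumerate(costs):
--             if min_val is None or c < min_val:
--                 min_val = c
--                 min_set = [a]
--             elif c == min_val:
--                 min_set.append(a)
--     else:
--         for a in limit_actions:
--             c = costs[a]
--             if min_val is None or c < min_val:
--                 min_val = c
--                 min_set = [a]
--             elif c == min_val:
--                 min_set.append(a)
--     return min_set
-- ===== SOURCE B (Python) =====
-- def min_set(costs, limit_actions=None):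
--     idxs = range(len(costs)) if limit_actions is None else limit_actions
--     if not idxs:
--         return []
--     m = min(costs[a] for a in idxs)
--     return [a for a in idxs if costs[a] == m]
-- ===== Notes on version B (the rewrite author's own statement) =====
-- stated objective: simpler
-- what changed: Replaces the single running-argmin pass with running min/set state by a compute-the-minimum pass followed by an order-preserving filter over one index source picked once.
import Mathlib
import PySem

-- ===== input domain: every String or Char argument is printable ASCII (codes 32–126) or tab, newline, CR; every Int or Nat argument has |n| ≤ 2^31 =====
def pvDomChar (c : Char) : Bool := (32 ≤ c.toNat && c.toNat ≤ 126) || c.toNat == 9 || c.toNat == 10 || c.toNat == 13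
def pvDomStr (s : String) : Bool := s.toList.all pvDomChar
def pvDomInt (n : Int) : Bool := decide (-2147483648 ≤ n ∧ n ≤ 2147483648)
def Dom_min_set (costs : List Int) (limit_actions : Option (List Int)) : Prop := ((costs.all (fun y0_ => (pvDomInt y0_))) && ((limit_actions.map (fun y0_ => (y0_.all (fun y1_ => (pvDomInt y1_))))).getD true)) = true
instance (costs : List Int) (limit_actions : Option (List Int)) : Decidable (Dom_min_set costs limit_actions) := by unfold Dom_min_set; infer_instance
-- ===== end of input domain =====

-- B replaces A's single running-argmin loop by a minimum pass followed by a filter pass (simpler decomposition).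

-- ===== PORT A =====
-- loop body shared by both of A's branches: state = (min_val, min_set)
def msStep (st : Option Int × List Int) (a : Int) (c : Int) : Option Int × List Int :=
  match st with
  | (none, _) => (some c, [a])
  | (some m, s) =>
      if c < m then (some c, [a])
      else if c == m then (some m, s ++ [a])
      else (some m, s)

def min_set (costs : List Int) (limit_actions : Option (List Int)) : List Int :=
  match limit_actions with
  | none =>
      ((PySem.List.enumerate costs).foldl (fun st p => msStep st p.1 p.2) (none, [])).2
  | some la =>
      -- costs[a]: pyGetD is exact under Pre_ (every a is in range; out of range Python raises IndexError)
      (la.foldl (fun st a => msStep st a (PySem.List.pyGetD costs a 0)) (none, [])).2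

-- ===== PORT B =====
def min_set_alt (costs : List Int) (limit_actions : Option (List Int)) : List Int :=
  let g : Int → Int := fun a => PySem.List.pyGetD costs a 0   -- costs[a], exact under Pre_
  let idxs : List Int :=
    match limit_actions with
    | none => PySem.List.pyRange 0 (costs.length : Int) 1
    | some la => la
  match idxs.map g with
  | [] => []
  | v :: rest => idxs.filter (fun a => g a == rest.foldl min v)

-- ===== PRECONDITION & SPEC =====
-- Pre_ excludes exactly the inputs where A raises IndexError: a limit_actions index out of range of costs.
def Pre_min_set (costs : List Int) (limit_actions : Option (List Int)) : Prop :=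
  match limit_actions with
  | none => True
  | some la => ∀ a ∈ la, PySem.Raise.InRange costs.length a

instance (costs : List Int) (limit_actions : Option (List Int)) : Decidable (Pre_min_set costs limit_actions) := by
  unfold Pre_min_set PySem.Raise.InRange
  cases limit_actions <;> infer_instance

def pvWitness_min_set : List Int × Option (List Int) := ([3, 1, 1, 2], some [0, 1, -1, 2])

def Spec_min_set (costs : List Int) (limit_actions : Option (List Int)) (out : List Int) : Prop := out = min_set_alt costs limit_actions
instance (costs : List Int) (limit_actions : Option (List Int)) (out : List Int) : Decidable (Spec_min_set costs limit_actions out) := by unfold Spec_min_set; infer_instance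

-- ===== CLAIM (what is proved, stated in full; the proofs are below) =====
def Claim_equal_min_set : Prop := ∀ (costs : List Int) (limit_actions : Option (List Int)), Dom_min_set costs limit_actions → Pre_min_set costs limit_actions → Spec_min_set costs limit_actions (min_set costs limit_actions)

-- ===== LEMMAS AND PROOFS =====

-- running minimum of the values of a list of (index, value) pairs
def runMin (ps : List (Int × Int)) (m : Int) : Int :=
  ps.foldl (fun acc p => min acc p.2) m

theorem runMin_le (ps : List (Int × Int)) (m : Int) : runMin ps m ≤ m := by
  induction ps generalizing m with
  | nil => simp [runMin]
  | cons p t ih =>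
      have := ih (min m p.2)
      simp only [runMin, List.foldl_cons] at this ⊢
      exact le_trans this (min_le_left _ _)

theorem fold_cons (st : Option Int × List Int) (p : Int × Int) (t : List (Int × Int)) :
    ((p :: t).foldl (fun st q => msStep st q.1 q.2) st)
      = t.foldl (fun st q => msStep st q.1 q.2) (msStep st p.1 p.2) := rfl

theorem fold_eq (ps : List (Int × Int)) (m : Int) (s : List Int) :
    ps.foldl (fun st p => msStep st p.1 p.2) (some m, s)
      = (some (runMin ps m),
         (if runMin ps m = m then s else [])
           ++ (ps.filter (fun p => p.2 == runMin ps m)).map Prod.fst) := by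
  induction ps generalizing m s with
  | nil => simp [runMin]
  | cons p t ih =>
      obtain ⟨a, c⟩ := p
      have hM : runMin ((a, c) :: t) m = runMin t (min m c) := by simp [runMin]
      rw [fold_cons]
      by_cases h1 : c < m
      · have hmin : min m c = c := by omega
        have hstep : msStep (some m, s) (a, c).1 (a, c).2 = (some c, [a]) := by
          simp [msStep, h1]
        rw [hstep, ih c [a], hM, hmin]
        have hle : runMin t c ≤ c := runMin_le t c
        have hne : ¬ runMin t c = m := by omega
        simp only [List.filter_cons]
        by_cases h2 : c = runMin t c
        · simp [← h2]
          intro h; exact absurd h (by omega)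
        · have : (c == runMin t c) = false := by simp [h2]
          simp [hne, this, Ne.symm h2]
      · by_cases h2 : c = m
        · subst h2
          have hstep : msStep (some c, s) (a, c).1 (a, c).2 = (some c, s ++ [a]) := by
            simp [msStep]
          rw [hstep, ih c (s ++ [a]), hM, min_self]
          simp only [List.filter_cons]
          by_cases h3 : runMin t c = c
          · simp [h3, List.append_assoc]
          · have : (c == runMin t c) = false := by simp; omega
            simp [h3, this]
        · have hstep : msStep (some m, s) (a, c).1 (a, c).2 = (some m, s) := by
            simp [msStep, h1, h2]
          rw [hstep, ih m s, hM]
          have hmin : min m c = m := by omega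
          rw [hmin]
          have hle : runMin t m ≤ m := runMin_le t m
          have : (c == runMin t m) = false := by simp; omega
          simp [this]

-- the whole equivalence, over a list of (index, value) pairs
theorem pairs_eq (a c : Int) (t : List (Int × Int)) :
    (((a, c) :: t).foldl (fun st p => msStep st p.1 p.2) ((none : Option Int), ([] : List Int))).2
      = (((a, c) :: t).filter (fun p => p.2 == runMin t c)).map Prod.fst := by
  rw [fold_cons]
  have h0 : msStep ((none : Option Int), ([] : List Int)) (a, c).1 (a, c).2 = (some c, [a]) := rfl
  rw [h0, fold_eq t c [a]]
  simp only [List.filter_cons]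
  by_cases h : runMin t c = c
  · simp [h]
  · have : (c == runMin t c) = false := by simp; omega
    simp [h, this]

-- instantiate with indices idxs and value function g
theorem idxs_eq (g : Int → Int) (idxs : List Int) :
    (idxs.foldl (fun st a => msStep st a (g a)) ((none : Option Int), ([] : List Int))).2
      = (match idxs.map g with
         | [] => []
         | v :: rest => idxs.filter (fun a => g a == rest.foldl min v)) := by
  cases idxs with
  | nil => rfl
  | cons a t =>
      have hpairs :
          ((a :: t).foldl (fun st x => msStep st x (g x)) ((none : Option Int), ([] : List Int)))
            = (((a :: t).map (fun x => (x, g x))).foldl (fun st p => msStep st p.1 p.2)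
                ((none : Option Int), ([] : List Int))) := by
        rw [List.foldl_map]
      rw [hpairs]
      simp only [List.map_cons]
      rw [pairs_eq a (g a) (t.map (fun x => (x, g x)))]
      have hrm : runMin (t.map (fun x => (x, g x))) (g a) = (t.map g).foldl min (g a) := by
        simp [runMin, List.foldl_map]
      rw [hrm]
      simp only [List.filter_cons, List.filter_map, List.map_map, List.map_cons]
      split_ifs <;> simp [List.map_map, Function.comp_def]

theorem min_set_spec : Claim_equal_min_set := by
  intro costs limit_actions _hdom hpre
  unfold Spec_min_set min_set min_set_alt
  cases limit_actions with
  | none =>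
      simp only
      rw [PySem.List.enumerate_eq_map_pyRange (d := 0), List.foldl_map]
      exact idxs_eq (fun a => PySem.List.pyGetD costs a 0) (PySem.List.pyRange 0 (costs.length : Int) 1)
  | some la =>
      exact idxs_eq (fun a => PySem.List.pyGetD costs a 0) la
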